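-- pv_equiv track=rewrite | github.com/a-shigemichi/leetcode | 1652_Defuse_the_Bomb.py | sum_next_k_element
-- ===== SOURCE A (Python) =====
-- def sum_next_k_element(code,k):
--     n=len(code)
--     new_code=[]
--     for i in range(n):
--         sum_val=0
--         for j in range(1,k+1):
--           sum_val+= code[(i+j)%n]
--         new_code.append(sum_val)
--     return new_code
-- ===== SOURCE B (Python) =====
-- def sum_next_k_element(code, k):
--     n = len(code)
--     if n == 0 or k <= 0:
--         return [0] * n
--     q, r = divmod(k, n)
--     total = sum(code)
--     prefix = [0]
--     for x in code + code:
--         prefix.append(prefix[-1] + x)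
--     return [q * total + prefix[i + 1 + r] - prefix[i + 1] for i in range(n)]
-- ===== Notes on version B (the rewrite author's own statement) =====
-- stated objective: faster
-- what changed: Replaces the O(n*k) nested loop (re-summing k cyclic successors for every index) by a closed form: one prefix-sum array over code+code plus divmod(k, n), so each output element is q*sum(code) + one prefix-sum difference.
import Mathlib
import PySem

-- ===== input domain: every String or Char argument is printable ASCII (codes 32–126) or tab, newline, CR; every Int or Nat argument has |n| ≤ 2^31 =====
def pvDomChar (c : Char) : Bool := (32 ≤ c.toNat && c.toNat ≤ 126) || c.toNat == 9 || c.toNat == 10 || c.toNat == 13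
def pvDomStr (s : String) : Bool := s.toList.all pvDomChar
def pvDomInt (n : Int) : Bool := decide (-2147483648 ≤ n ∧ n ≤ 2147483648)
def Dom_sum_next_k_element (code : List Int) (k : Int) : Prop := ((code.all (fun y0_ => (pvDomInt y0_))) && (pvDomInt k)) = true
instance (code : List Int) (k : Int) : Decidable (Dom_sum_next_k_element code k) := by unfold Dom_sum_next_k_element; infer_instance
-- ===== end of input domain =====

-- B replaces A's O(n*k) nested cyclic summation by divmod(k, n) plus one prefix-sum
-- array over code ++ code (objective: faster, asymptotically).

-- ===== PORT A =====
-- literal transliteration of A: for each i in range(n), sum code[(i+j) % n] for j in range(1, k+1)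
def sum_next_k_element (code : List Int) (k : Int) : List Int :=
  let n : Int := PySem.List.len code
  (PySem.List.pyRange 0 n 1).foldl
    (fun new_code i =>
      new_code ++ [(PySem.List.pyRange 1 (k + 1) 1).foldl
        (fun sum_val j => sum_val + PySem.List.pyGetD code (PySem.Int.mod (i + j) n) 0) 0])
    []

-- ===== PORT B =====
-- literal transliteration of Source B: divmod, prefix sums of code + code, list comprehension
def sum_next_k_element_alt (code : List Int) (k : Int) : List Int :=
  let n : Int := PySem.List.len code
  if n = 0 ∨ k ≤ 0 then
    List.replicate n.toNat 0
  else
    let q := PySem.Int.floordiv k n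
    let r := PySem.Int.mod k n
    let total := code.sum
    let pref := (code ++ code).foldl
      (fun p x => p ++ [PySem.List.pyGetD p (-1) 0 + x]) [0]
    (PySem.List.pyRange 0 n 1).map
      (fun i => q * total + PySem.List.pyGetD pref (i + 1 + r) 0
                  - PySem.List.pyGetD pref (i + 1) 0)

-- ===== PRECONDITION & SPEC =====
def Spec_sum_next_k_element (code : List Int) (k : Int) (out : List Int) : Prop := out = sum_next_k_element_alt code k
instance (code : List Int) (k : Int) (out : List Int) : Decidable (Spec_sum_next_k_element code k out) := by unfold Spec_sum_next_k_element; infer_instance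

-- ===== CLAIM (what is proved, stated in full; the proofs are below) =====
def Claim_equal_sum_next_k_element : Prop := ∀ (code : List Int) (k : Int), Dom_sum_next_k_element code k → Spec_sum_next_k_element code k (sum_next_k_element code k)

-- ===== LEMMAS AND PROOFS =====

-- pvH code s m = sum over t < m of code[(s+t+1) % n]  (the cyclic window A computes)
def pvH (code : List Int) (s : Nat) : Nat → Int
  | 0 => 0
  | m + 1 => pvH code s m + code.getD ((s + m + 1) % code.length) 0

-- A's inner loop equals pvH
lemma pvInner (code : List Int) (i : Nat) (m : Nat) :
    (PySem.List.pyRange 1 ((m : Int) + 1) 1).foldl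
      (fun sum_val j => sum_val + PySem.List.pyGetD code (PySem.Int.mod ((i : Int) + j) (code.length : Int)) 0) 0
    = pvH code i m := by
  induction m with
  | zero => simp [PySem.List.pyRange_one_eq_nil, pvH]
  | succ m ih =>
    have h1 : (1 : Int) ≤ (m : Int) + 1 := by omega
    push_cast
    rw [PySem.List.pyRange_one_succ_right h1, List.foldl_append]
    simp only [List.foldl, ih, pvH]
    have hcast : (i : Int) + ((m : Int) + 1) = ((i + m + 1 : Nat) : Int) := by push_cast; ring
    rw [hcast, PySem.Int.mod_natCast, PySem.List.pyGetD_natCast]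

-- shift: splitting the window
lemma pvH_add (code : List Int) (s a b : Nat) :
    pvH code s (a + b) = pvH code s a + pvH code (s + a) b := by
  induction b with
  | zero => simp [pvH]
  | succ b ih =>
    have : a + (b + 1) = (a + b) + 1 := by omega
    rw [this]
    simp only [pvH, ih]
    have : s + a + b + 1 = s + (a + b) + 1 := by omega
    rw [this]; ring

-- pvH does not depend on s modulo n
lemma pvH_shift_period (code : List Int) (s m : Nat) :
    pvH code (s + code.length) m = pvH code s m := by
  induction m with
  | zero => rfl
  | succ m ih =>
    simp only [pvH, ih]
    congr 2
    have h : s + code.length + m + 1 = (s + m + 1) + code.length := by omega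
    rw [h, Nat.add_mod_right]

-- full cycle sums the whole list: base case s = 0
lemma pvH_zero_cycle (code : List Int) :
    pvH code 0 code.length = code.sum := by
  cases code with
  | nil => rfl
  | cons c cs =>
    have hlen : (c :: cs).length = cs.length + 1 := rfl
    rw [hlen]
    simp only [pvH]
    have hlast : (0 + cs.length + 1) % (c :: cs).length = 0 := by
      rw [hlen, show 0 + cs.length + 1 = cs.length + 1 from by omega, Nat.mod_self]
    rw [hlast]
    have htail : ∀ m, m ≤ cs.length → pvH (c :: cs) 0 m = (cs.take m).sum := by
      intro m
      induction m with
      | zero => intro _; rfl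
      | succ m ih =>
        intro hm
        simp only [pvH]
        rw [ih (by omega)]
        have hmod : (0 + m + 1) % (c :: cs).length = m + 1 := by
          rw [hlen, show 0 + m + 1 = m + 1 from by omega, Nat.mod_eq_of_lt (by omega)]
        rw [hmod]
        have hm' : m < cs.length := by omega
        rw [List.take_add_one]
        simp [List.getD, hm']
    rw [htail cs.length (le_refl _), List.take_length]
    simp [List.sum_cons]
    ring

-- full cycle from any start
lemma pvH_cycle (code : List Int) (s : Nat) :
    pvH code s code.length = code.sum := by
  induction s with
  | zero => exact pvH_zero_cycle code
  | succ s ih =>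
    -- pvH s (n+1) computed two ways
    have h1 : pvH code s (code.length + 1)
        = pvH code s code.length + code.getD ((s + code.length + 1) % code.length) 0 := rfl
    have h2 : pvH code s (1 + code.length)
        = pvH code s 1 + pvH code (s + 1) code.length := pvH_add code s 1 code.length
    have h3 : pvH code s 1 = code.getD ((s + 1) % code.length) 0 := by
      simp [pvH]
    have h4 : (s + code.length + 1) % code.length = (s + 1) % code.length := by
      rw [show s + code.length + 1 = (s + 1) + code.length from by omega, Nat.add_mod_right]
    have h5 : code.length + 1 = 1 + code.length := by omega
    rw [h5, h2, h3] at h1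
    rw [h4] at h1
    rw [ih] at h1
    omega

-- decomposition: q full cycles plus remainder
lemma pvH_decomp (code : List Int) (s : Nat) (c m : Nat) :
    pvH code s (c * code.length + m) = (c : Int) * code.sum + pvH code s m := by
  induction c with
  | zero => simp
  | succ c ih =>
    have h : (c + 1) * code.length + m = code.length + (c * code.length + m) := by ring
    rw [h, pvH_add, pvH_cycle, pvH_shift_period, ih]
    push_cast; ring

-- A characterized
lemma pvA_char (code : List Int) (k : Int) :
    sum_next_k_element code k
    = (List.range code.length).map (fun i => pvH code i k.toNat) := by
  unfold sum_next_k_element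
  rw [PySem.List.foldl_append_singleton_eq_map]
  simp only [PySem.List.len_eq, PySem.List.pyRange_zero_nat, List.map_map, List.nil_append]
  apply List.map_congr_left
  intro i _
  simp only [Function.comp]
  by_cases hk : k ≤ 0
  · have h0 : k.toNat = 0 := by omega
    rw [PySem.List.pyRange_one_eq_nil (by omega)]
    simp [h0, pvH]
  · have hk' : k = (k.toNat : Int) := by omega
    rw [hk']
    exact pvInner code i k.toNat

-- the fold building the prefix list is scanl
lemma pvPrefix_scanl (l : List Int) (acc : List Int) (a : Int) :
    l.foldl (fun p x => p ++ [PySem.List.pyGetD p (-1) 0 + x]) (acc ++ [a])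
    = acc ++ List.scanl (· + ·) a l := by
  induction l generalizing acc a with
  | nil => simp [List.scanl_nil]
  | cons x xs ih =>
    simp only [List.foldl]
    rw [PySem.List.pyGetD_neg_one_append_singleton, ih, List.scanl_cons]
    simp

-- scanl indexing: partial sums
lemma pvScanl_getD (l : List Int) (a : Int) (u : Nat) (hu : u ≤ l.length) :
    (List.scanl (· + ·) a l).getD u 0 = a + (l.take u).sum := by
  induction l generalizing a u with
  | nil =>
    have : u = 0 := by simpa using hu
    simp [this, List.scanl_nil]
  | cons x xs ih =>
    cases u with
    | zero => rw [List.scanl_cons]; simp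
    | succ u =>
      rw [List.scanl_cons]
      show (List.scanl (· + ·) (a + x) xs).getD u 0 = _
      rw [ih (a + x) u (by simpa using hu)]
      rw [List.take_succ_cons, List.sum_cons]
      ring

-- element of the doubled list
lemma pvDoubled_getD (code : List Int) (u : Nat) (hu : u < 2 * code.length) :
    (code ++ code).getD u 0 = code.getD (u % code.length) 0 := by
  by_cases h : u < code.length
  · rw [Nat.mod_eq_of_lt h]
    simp [List.getD, List.getElem?_append_left h]
  · have h1 : code.length ≤ u := by omega
    have h2 : u - code.length < code.length := by omega
    have h3 : u % code.length = u - code.length := by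
      rw [Nat.mod_eq_sub_mod h1, Nat.mod_eq_of_lt h2]
    rw [h3]
    simp [List.getD, List.getElem?_append_right h1]

-- window sum over the doubled list equals pvH
lemma pvWindow (code : List Int) (i m : Nat) (h : i + 1 + m ≤ 2 * code.length) :
    ((code ++ code).take (i + 1 + m)).sum = ((code ++ code).take (i + 1)).sum + pvH code i m := by
  induction m with
  | zero => simp [pvH]
  | succ m ih =>
    have hlt : i + 1 + m < (code ++ code).length := by
      simp only [List.length_append]; omega
    have hstep : ((code ++ code).take (i + 1 + (m + 1))).sum
        = ((code ++ code).take (i + 1 + m)).sum + (code ++ code).getD (i + 1 + m) 0 := by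
      have heq : i + 1 + (m + 1) = (i + 1 + m) + 1 := by omega
      rw [heq, List.sum_take_succ _ _ hlt]
      simp [List.getD, List.getElem?_eq_getElem hlt]
    rw [hstep, ih (by omega), pvDoubled_getD code (i + 1 + m) (by omega)]
    simp only [pvH]
    have : (i + 1 + m) % code.length = (i + m + 1) % code.length := by
      congr 1; omega
    rw [this]; ring

-- ===== VERDICT (by name: the statement is the Claim_ definition above) =====
theorem sum_next_k_element_spec : Claim_equal_sum_next_k_element := by
  intro code k _
  unfold Spec_sum_next_k_element
  rw [pvA_char]
  unfold sum_next_k_element_alt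
  simp only [PySem.List.len_eq]
  by_cases htriv : (code.length : Int) = 0 ∨ k ≤ 0
  · rw [if_pos htriv]
    rcases htriv with h | h
    · have hc : code = [] := List.eq_nil_of_length_eq_zero (by exact_mod_cast h)
      subst hc; simp
    · have hk0 : k.toNat = 0 := by omega
      rw [hk0]
      simp [pvH]
  · rw [if_neg htriv]
    rw [not_or] at htriv
    obtain ⟨hn, hk0⟩ := htriv
    have hnpos : 0 < code.length := by
      rcases Nat.eq_zero_or_pos code.length with h | h
      · exact absurd (by exact_mod_cast h) hn
      · exact h
    have hkpos : 0 < k := by omega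
    -- rewrite the pyRange map into List.range
    rw [PySem.List.pyRange_zero_nat, List.map_map]
    apply List.map_congr_left
    intro i hi
    have hi' : i < code.length := List.mem_range.mp hi
    simp only [Function.comp]
    -- names for q, r
    have hkcast : k = (k.toNat : Int) := by omega
    have hq : PySem.Int.floordiv k (code.length : Int) = ((k.toNat / code.length : Nat) : Int) := by
      rw [hkcast]; exact PySem.Int.floordiv_natCast _ _
    have hr : PySem.Int.mod k (code.length : Int) = ((k.toNat % code.length : Nat) : Int) := by
      rw [hkcast]; exact PySem.Int.mod_natCast _ _
    set rn := k.toNat % code.length with hrn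
    set qn := k.toNat / code.length with hqn
    have hrlt : rn < code.length := Nat.mod_lt _ hnpos
    -- prefix list
    rw [show ([0] : List Int) = [] ++ [(0 : Int)] from rfl, pvPrefix_scanl]
    simp only [List.nil_append]
    have hlen2 : (code ++ code).length = 2 * code.length := by
      simp [List.length_append]; omega
    -- the two pyGetD lookups
    have hidx1 : (i : Int) + 1 + PySem.Int.mod k (code.length : Int) = ((i + 1 + rn : Nat) : Int) := by
      rw [hr]; push_cast; ring
    have hidx2 : (i : Int) + 1 = ((i + 1 : Nat) : Int) := by push_cast; ring
    rw [hidx1, hidx2, PySem.List.pyGetD_natCast, PySem.List.pyGetD_natCast,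
        pvScanl_getD _ _ _ (by omega : i + 1 + rn ≤ (code ++ code).length),
        pvScanl_getD _ _ _ (by omega : i + 1 ≤ (code ++ code).length),
        pvWindow code i rn (by omega), hq]
    have hsplit : k.toNat = qn * code.length + rn := by
      rw [hqn, hrn, Nat.mul_comm]
      exact (Nat.div_add_mod _ _).symm
    rw [hsplit, pvH_decomp]
    ring
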